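-- pv_equiv track=rewrite | github.com/LcfherShell/SuperNano | libs/helperegex.py | count_character_outside_quotes
-- ===== SOURCE A (Python) =====
-- def count_character_outside_quotes(input_string, character):
--     """
--     Count occurrences of a specified character outside of quotes.
--
--     Parameters:
--     - input_string (str): The input string to process.
--     - character (str): The character to count.
--
--     Returns:
--     - int: The number of occurrences of the character outside quotes.
--     """
--     inside_quotes = False
--     count = 0
--     quote_char = ''
--
--     for i, char in enumerate(input_string):
--         if char in ('"', "'"):
--             if not inside_quotes:
--                 # Entering a quoted section
--                 inside_quotes = True
--                 quote_char = char
--             elif char == quote_char: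
--                 # Exiting a quoted section
--                 inside_quotes = False
--         elif char == character and not inside_quotes:
--             count += 1
--
--     return count
-- ===== SOURCE B (Python) =====
-- def count_character_outside_quotes(input_string, character):
--     # Segment-skipping: find the next quote, count matches in the unquoted
--     # segment before it, then jump straight past the matching closing quote.
--     total = 0
--     rest = list(input_string)
--     while True:
--         k = 0
--         while k < len(rest) and rest[k] not in ('"', "'"):
--             k += 1
--         total += sum(1 for c in rest[:k] if c == character)
--         if k == len(rest):
--             return total
--         q = rest[k]
--         rest = rest[k + 1:]
--         if q not in rest:
--             return total
--         rest = rest[rest.index(q) + 1:]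
-- ===== Notes on version B (the rewrite author's own statement) =====
-- stated objective: alternative
-- what changed: B replaces A's per-character quote state machine with a segment-skipping loop: it locates the next quote, counts matches by explicit equality in the unquoted segment before it, then jumps directly past the matching closing quote.
import Mathlib
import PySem

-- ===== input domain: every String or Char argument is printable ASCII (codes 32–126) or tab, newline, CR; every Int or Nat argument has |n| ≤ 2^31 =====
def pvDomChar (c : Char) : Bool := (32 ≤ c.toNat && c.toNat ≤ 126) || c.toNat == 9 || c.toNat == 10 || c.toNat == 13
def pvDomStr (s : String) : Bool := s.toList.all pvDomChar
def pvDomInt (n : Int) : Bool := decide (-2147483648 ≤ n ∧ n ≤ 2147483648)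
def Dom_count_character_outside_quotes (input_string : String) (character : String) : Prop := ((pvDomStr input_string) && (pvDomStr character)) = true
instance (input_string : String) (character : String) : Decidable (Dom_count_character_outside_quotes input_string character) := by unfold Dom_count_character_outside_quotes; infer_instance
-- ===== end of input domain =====

-- A counts per character with a quote state machine; B instead skips from quote to
-- matching quote, counting only inside the unquoted segments (alternative algorithm).

-- ===== PORT A =====
def stepA_ccoq (character : String) (st : Bool × String × Int) (char : Char) : Bool × String × Int :=
  if char = '"' ∨ char = '\'' then
    if !st.1 then (true, String.mk [char], st.2.2)
    else if String.mk [char] = st.2.1 then (false, st.2.1, st.2.2)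
    else st
  else if String.mk [char] = character ∧ !st.1 then (st.1, st.2.1, st.2.2 + 1)
  else st

def count_character_outside_quotes (input_string : String) (character : String) : Int :=
  (input_string.toList.foldl (stepA_ccoq character) (false, "", 0)).2.2

-- ===== PORT B =====
def ccoq_isQuote (c : Char) : Bool := c == '"' || c == '\''

-- sum(1 for c in seg if c == character)
def ccoq_countEq (character : String) (seg : List Char) : Int :=
  seg.foldl (fun acc c => if String.mk [c] = character then acc + 1 else acc) 0

-- the outer while loop of Source B; the inner index loop computing k gives
-- rest[:k] = takeWhile (not quote) and rest[k:] = dropWhile (not quote)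
def ccoq_go (character : String) (rest : List Char) : Int :=
  let total := ccoq_countEq character (rest.takeWhile (fun c => !ccoq_isQuote c))
  match h : rest.dropWhile (fun c => !ccoq_isQuote c) with
  | [] => total
  | q :: rest' =>
      if rest'.contains q then
        total + ccoq_go character (rest'.drop (rest'.idxOf q + 1))
      else total
termination_by rest.length
decreasing_by
  have h1 : (rest.dropWhile (fun c => !ccoq_isQuote c)).length ≤ rest.length :=
    List.length_dropWhile_le _ _
  rw [h] at h1
  have h2 : (rest'.drop (rest'.idxOf q + 1)).length ≤ rest'.length := by
    rw [List.length_drop]; omega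
  simp at h1
  omega

def count_character_outside_quotes_alt (input_string : String) (character : String) : Int :=
  ccoq_go character input_string.toList

-- ===== PRECONDITION & SPEC =====
def Spec_count_character_outside_quotes (input_string : String) (character : String) (out : Int) : Prop := out = count_character_outside_quotes_alt input_string character
instance (input_string : String) (character : String) (out : Int) : Decidable (Spec_count_character_outside_quotes input_string character out) := by unfold Spec_count_character_outside_quotes; infer_instance

-- ===== CLAIM =====
def Claim_equal_count_character_outside_quotes : Prop := ∀ (input_string : String) (character : String), Dom_count_character_outside_quotes input_string character → Spec_count_character_outside_quotes input_string character (count_character_outside_quotes input_string character)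

-- ===== LEMMAS AND PROOFS =====

-- the counting fold shifts over its initial accumulator
theorem ccoq_count_shift (character : String) (xs : List Char) (i : Int) :
    xs.foldl (fun acc c => if String.mk [c] = character then acc + 1 else acc) i
      = i + ccoq_countEq character xs := by
  unfold ccoq_countEq
  induction xs generalizing i with
  | nil => simp
  | cons c xs ih =>
    simp only [List.foldl_cons]
    rw [ih, ih (if String.mk [c] = character then 0 + 1 else 0)]
    split_ifs <;> omega

-- A over a quote-free segment, outside quotes: just counts matches
theorem ccoq_foldA_false (character q0 : String) (cnt : Int) (u : List Char)
    (hu : ∀ c ∈ u, ccoq_isQuote c = false) :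
    u.foldl (stepA_ccoq character) (false, q0, cnt)
      = (false, q0, cnt + ccoq_countEq character u) := by
  induction u generalizing cnt with
  | nil => simp [ccoq_countEq]
  | cons c u ih =>
    have hc : ccoq_isQuote c = false := hu c (by simp)
    have hcq : ¬ (c = '"' ∨ c = '\'') := by
      simp [ccoq_isQuote] at hc; tauto
    simp only [List.foldl_cons, stepA_ccoq, hcq, if_false]
    by_cases hm : String.mk [c] = character
    · rw [if_pos (by exact ⟨hm, rfl⟩)]
      rw [ih _ (fun d hd => hu d (by simp [hd]))]
      have hcc : ccoq_countEq character (c :: u) = 0 + 1 + ccoq_countEq character u := by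
        simp only [ccoq_countEq, List.foldl_cons, if_pos hm]
        exact ccoq_count_shift character u (0 + 1)
      rw [hcc]
      simp only [Prod.mk.injEq, true_and]
      omega
    · rw [if_neg (by simp [hm])]
      rw [ih _ (fun d hd => hu d (by simp [hd]))]
      have hcc : ccoq_countEq character (c :: u) = ccoq_countEq character u := by
        simp only [ccoq_countEq, List.foldl_cons, hm, if_false]
      rw [hcc]

-- A inside quotes skips everything until the matching quote char
theorem ccoq_foldA_inside (character : String) (qc : Char) (cnt : Int) (v : List Char)
    (hv : qc ∉ v) :
    v.foldl (stepA_ccoq character) (true, String.mk [qc], cnt)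
      = (true, String.mk [qc], cnt) := by
  induction v with
  | nil => rfl
  | cons c v ih =>
    have hne : c ≠ qc := by intro h; exact hv (by simp [h])
    have hmkne : ¬ (String.mk [c] = String.mk [qc]) := by
      intro h
      have h2 : ([c] : List Char) = [qc] := String.ofList_inj.mp h
      exact hne (by injection h2)
    simp only [List.foldl_cons, stepA_ccoq]
    by_cases h1 : c = '"' ∨ c = '\''
    · rw [if_pos h1, if_neg (by simp), if_neg hmkne]
      exact ih (fun h => hv (by simp [h]))
    · rw [if_neg h1, if_neg (by simp)]
      exact ih (fun h => hv (by simp [h]))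

-- the head of a non-empty dropWhile fails the predicate
theorem ccoq_dropWhile_head (p : Char → Bool) :
    ∀ (l rest' : List Char) (q : Char), l.dropWhile p = q :: rest' → p q = false := by
  intro l
  induction l with
  | nil => intro rest' q h; simp at h
  | cons c l ih =>
    intro rest' q h
    rw [List.dropWhile_cons] at h
    by_cases hc : p c
    · rw [if_pos hc] at h; exact ih _ _ h
    · rw [if_neg hc] at h
      cases h
      simpa using hc

-- nothing before the first occurrence equals it
theorem ccoq_not_mem_take_idxOf (a : Char) : ∀ (l : List Char), a ∉ l.take (l.idxOf a) := by
  intro l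
  induction l with
  | nil => simp
  | cons b l ih =>
    by_cases hb : b = a
    · simp [hb]
    · simp [hb, List.take_succ_cons]
      exact ⟨fun h => hb h.symm, ih⟩

-- unfolding equations for ccoq_go
theorem ccoq_go_nil (character : String) (chars : List Char)
    (h : chars.dropWhile (fun c => !ccoq_isQuote c) = []) :
    ccoq_go character chars
      = ccoq_countEq character (chars.takeWhile (fun c => !ccoq_isQuote c)) := by
  rw [ccoq_go, h]

theorem ccoq_go_cons (character : String) (chars : List Char) (q : Char) (rest' : List Char)
    (h : chars.dropWhile (fun c => !ccoq_isQuote c) = q :: rest') :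
    ccoq_go character chars
      = (if rest'.contains q then
          ccoq_countEq character (chars.takeWhile (fun c => !ccoq_isQuote c))
            + ccoq_go character (rest'.drop (rest'.idxOf q + 1))
        else ccoq_countEq character (chars.takeWhile (fun c => !ccoq_isQuote c))) := by
  rw [ccoq_go, h]

-- main correspondence, strong induction on the list length
theorem ccoq_main_aux (character : String) :
    ∀ (n : Nat) (chars : List Char), chars.length ≤ n → ∀ (q0 : String) (cnt : Int),
      (chars.foldl (stepA_ccoq character) (false, q0, cnt)).2.2
        = cnt + ccoq_go character chars := by
  intro n
  induction n with
  | zero =>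
    intro chars h q0 cnt
    have hnil : chars = [] := List.eq_nil_of_length_eq_zero (Nat.le_zero.mp h)
    subst hnil
    rw [ccoq_go_nil character [] (by simp)]
    simp [ccoq_countEq]
  | succ n ih =>
    intro chars hlen q0 cnt
    have hu : ∀ c ∈ chars.takeWhile (fun c => !ccoq_isQuote c), ccoq_isQuote c = false := by
      intro c hc
      have := List.mem_takeWhile_imp hc
      simpa using this
    have hsplit : chars = chars.takeWhile (fun c => !ccoq_isQuote c)
        ++ chars.dropWhile (fun c => !ccoq_isQuote c) :=
      (List.takeWhile_append_dropWhile).symm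
    cases hd : chars.dropWhile (fun c => !ccoq_isQuote c) with
    | nil =>
      rw [ccoq_go_nil character chars hd]
      conv_lhs => rw [hsplit, hd]
      rw [List.append_nil, ccoq_foldA_false character q0 cnt _ hu]
    | cons q rest' =>
      -- q is a quote character
      have hq : ccoq_isQuote q = true := by
        have := ccoq_dropWhile_head (fun c => !ccoq_isQuote c) chars rest' q hd
        simpa using this
      have hq' : q = '"' ∨ q = '\'' := by
        simp [ccoq_isQuote] at hq; tauto
      have hlen2 : rest'.length < chars.length := by
        have h1 : (chars.dropWhile (fun c => !ccoq_isQuote c)).length ≤ chars.length :=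
          List.length_dropWhile_le _ _
        rw [hd] at h1
        simp at h1
        omega
      conv_lhs => rw [hsplit, hd]
      rw [List.foldl_append, ccoq_foldA_false character q0 cnt _ hu, List.foldl_cons]
      -- the step on the opening quote
      have hstep : stepA_ccoq character (false, q0, cnt + ccoq_countEq character
            (chars.takeWhile (fun c => !ccoq_isQuote c))) q
          = (true, String.mk [q], cnt + ccoq_countEq character
            (chars.takeWhile (fun c => !ccoq_isQuote c))) := by
        simp only [stepA_ccoq, if_pos hq']
        rfl
      rw [hstep, ccoq_go_cons character chars q rest' hd]
      by_cases hc : rest'.contains q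
      · rw [if_pos hc]
        have hmem : q ∈ rest' := by simpa using hc
        have hk : rest'.idxOf q < rest'.length := List.idxOf_lt_length_of_mem hmem
        have hdec : rest' = rest'.take (rest'.idxOf q)
            ++ q :: rest'.drop (rest'.idxOf q + 1) := by
          conv_lhs => rw [← List.take_append_drop (rest'.idxOf q) rest']
          rw [List.drop_eq_getElem_cons hk, List.getElem_idxOf hk]
        conv_lhs => rw [hdec]
        rw [List.foldl_append,
            ccoq_foldA_inside character q _ _ (ccoq_not_mem_take_idxOf q rest'),
            List.foldl_cons]
        -- the step on the closing quote
        have hstep2 : stepA_ccoq character (true, String.mk [q], cnt + ccoq_countEq character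
              (chars.takeWhile (fun c => !ccoq_isQuote c))) q
            = (false, String.mk [q], cnt + ccoq_countEq character
              (chars.takeWhile (fun c => !ccoq_isQuote c))) := by
          simp only [stepA_ccoq, if_pos hq']
          simp
        rw [hstep2]
        rw [ih (rest'.drop (rest'.idxOf q + 1))
              (by rw [List.length_drop]; omega) (String.mk [q]) _]
        omega
      · rw [if_neg hc]
        have hnm : q ∉ rest' := by simpa using hc
        rw [ccoq_foldA_inside character q _ _ hnm]

theorem ccoq_main (character : String) (chars : List Char) (q0 : String) (cnt : Int) :
    (chars.foldl (stepA_ccoq character) (false, q0, cnt)).2.2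
      = cnt + ccoq_go character chars :=
  ccoq_main_aux character chars.length chars (Nat.le_refl _) q0 cnt

-- ===== VERDICT =====
theorem count_character_outside_quotes_spec : Claim_equal_count_character_outside_quotes := by
  intro input_string character _
  unfold Spec_count_character_outside_quotes count_character_outside_quotes count_character_outside_quotes_alt
  rw [ccoq_main]
  simp
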